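-- pv_equiv track=rewrite | github.com/mageshyt/leetcode-solutions | Hash map/2306. Naming a Company.py | distinctNames
-- ===== SOURCE A (Python) =====
-- import collections
--
-- def distinctNames(ideas) -> int:
--
--     distMap = collections.defaultdict(set)
--
--     valid_name = 0
--
--     for idea in ideas:
--         first_char = idea[0]
--         distMap[first_char].add(idea[1:])
--
--     for [char1, words1] in distMap.items():
--         for [char2, words2] in distMap.items():
--
--             # if both have same starting letter
--             if char1 == char2:
--                 continue
--
--             intersection = 0  # no of duplicate
--
--             for w in words1:
--                 # it is a duplicate so increment intersection
--                 if w in words2: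
--                     intersection += 1
--
--             dist_1 = len(words1) - intersection  # no of unique
--             dist_2 = len(words2) - intersection  # no of unique
--
--             valid_name += dist_1 * dist_2  # no of valid names
--
--     return valid_name
-- ===== SOURCE B (Python) =====
-- import collections
--
-- def distinctNames(ideas) -> int:
--     # inverted index: suffix -> set of first letters
--     letters_of = collections.defaultdict(set)
--     for idea in ideas:
--         letters_of[idea[1:]].add(idea[0])
--
--     count = collections.defaultdict(int)    # letter -> number of distinct suffixes
--     common = collections.defaultdict(int)   # (c1, c2) -> suffixes shared by both letters
--     for letters in letters_of.values():
--         for c1 in letters: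
--             count[c1] += 1
--             for c2 in letters:
--                 if c1 != c2:
--                     common[(c1, c2)] += 1
--
--     total = 0
--     for c1 in count:
--         for c2 in count:
--             if c1 != c2:
--                 o = common.get((c1, c2), 0)
--                 total += (count[c1] - o) * (count[c2] - o)
--     return total
-- ===== Notes on version B (the rewrite author's own statement) =====
-- stated objective: alternative
-- what changed: Replaces the per-letter grouping with pairwise set-intersection scans by an inverted index suffix -> first-letter set, from which a per-letter distinct-suffix count and a co-occurrence table common[(c1,c2)] are accumulated in one pass; the answer is then the summation (count[c1]-common)*(count[c2]-common) over ordered letter pairs.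
import Mathlib
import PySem

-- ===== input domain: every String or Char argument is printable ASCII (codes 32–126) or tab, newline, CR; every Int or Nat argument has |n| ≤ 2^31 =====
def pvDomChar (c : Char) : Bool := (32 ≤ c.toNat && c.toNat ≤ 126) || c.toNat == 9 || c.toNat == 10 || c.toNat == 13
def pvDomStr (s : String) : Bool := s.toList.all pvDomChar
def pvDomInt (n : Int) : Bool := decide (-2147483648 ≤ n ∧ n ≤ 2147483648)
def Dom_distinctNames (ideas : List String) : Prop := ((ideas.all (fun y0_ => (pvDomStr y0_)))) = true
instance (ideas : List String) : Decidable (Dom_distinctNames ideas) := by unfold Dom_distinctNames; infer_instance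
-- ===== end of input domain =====

-- B replaces A's per-letter grouping + pairwise intersection scans by an inverted index
-- suffix -> first-letter set with a count/co-occurrence summation (alternative algorithm, similar cost).

-- ===== PORT A =====
def distinctNames (ideas : List String) : Int :=
  -- distMap[first_char].add(idea[1:])  (defaultdict(set))
  let distMap : PySem.Dict Char (PySem.Set String) :=
    ideas.foldl (fun d idea =>
      match PySem.Str.pyGet? idea 0 with   -- idea[0]; none = IndexError, excluded by Pre_
      | none => d
      | some fc => d.modify fc PySem.Set.empty
          (fun s => PySem.Set.add s (PySem.Str.slice idea (some 1) none))) PySem.Dict.empty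
  distMap.items.foldl (fun acc p1 =>
    distMap.items.foldl (fun acc p2 =>
      if p1.1 == p2.1 then acc
      else
        let inter : Int :=
          p1.2.foldl (fun i w => if PySem.Set.contains p2.2 w then i + 1 else i) 0
        acc + (PySem.Set.len p1.2 - inter) * (PySem.Set.len p2.2 - inter)) acc) 0

-- ===== PORT B =====
def distinctNames_alt (ideas : List String) : Int :=
  -- letters_of[idea[1:]].add(idea[0])  (defaultdict(set))
  let lettersOf : PySem.Dict String (PySem.Set Char) :=
    ideas.foldl (fun d idea =>
      match PySem.Str.pyGet? idea 0 with   -- idea[0]; none = IndexError, excluded by Pre_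
      | none => d
      | some fc => d.modify (PySem.Str.slice idea (some 1) none) PySem.Set.empty
          (fun s => PySem.Set.add s fc)) PySem.Dict.empty
  -- one pass over the letter sets: count[c1] += 1, common[(c1,c2)] += 1
  let cc : PySem.Dict Char Int × PySem.Dict (Char × Char) Int :=
    lettersOf.values.foldl (fun st letters =>
      letters.foldl (fun st c1 =>
        letters.foldl (fun st c2 =>
          if c1 == c2 then st
          else (st.1, st.2.modify (c1, c2) 0 (· + 1)))
          (st.1.modify c1 0 (· + 1), st.2)) st)
      (PySem.Dict.empty, PySem.Dict.empty)
  -- total += (count[c1]-o)*(count[c2]-o) over ordered pairs of keys of count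
  cc.1.keys.foldl (fun acc c1 =>
    cc.1.keys.foldl (fun acc c2 =>
      if c1 == c2 then acc
      else
        let o : Int := cc.2.getD (c1, c2) 0
        acc + (cc.1.getD c1 0 - o) * (cc.1.getD c2 0 - o)) acc) 0

-- ===== PRECONDITION & SPEC =====
-- Pre_ excludes exactly the inputs containing an empty string, on which A's idea[0] raises IndexError.
def Pre_distinctNames (ideas : List String) : Prop := ∀ s ∈ ideas, s ≠ ""
instance (ideas : List String) : Decidable (Pre_distinctNames ideas) := by
  unfold Pre_distinctNames; infer_instance
def pvWitness_distinctNames : List String := ["cat", "dog", "cog"]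

def Spec_distinctNames (ideas : List String) (out : Int) : Prop := out = distinctNames_alt ideas
instance (ideas : List String) (out : Int) : Decidable (Spec_distinctNames ideas out) := by
  unfold Spec_distinctNames; infer_instance

-- ===== CLAIM (what is proved, stated in full; the proofs are below) =====
def Claim_equal_distinctNames : Prop :=
  ∀ (ideas : List String), Dom_distinctNames ideas → Pre_distinctNames ideas →
    Spec_distinctNames ideas (distinctNames ideas)

-- ===== LEMMAS AND PROOFS =====


-- the deduplication-relevant content of the input: the list of (first letter, suffix) pairs
def pvPairs (ideas : List String) : List (Char × String) :=
  ideas.filterMap (fun s => (PySem.Str.pyGet? s 0).map (fun c => (c, PySem.Str.slice s (some 1) none)))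

def pvGroupA (ps : List (Char × String)) : PySem.Dict Char (PySem.Set String) :=
  ps.foldl (fun d p => d.modify p.1 PySem.Set.empty (fun s => PySem.Set.add s p.2)) PySem.Dict.empty

def pvGroupB (ps : List (Char × String)) : PySem.Dict String (PySem.Set Char) :=
  ps.foldl (fun d p => d.modify p.2 PySem.Set.empty (fun s => PySem.Set.add s p.1)) PySem.Dict.empty

def pvWA (ps : List (Char × String)) (c : Char) : PySem.Set String :=
  (pvGroupA ps).getD c PySem.Set.empty

def pvLs (ps : List (Char × String)) : List (PySem.Set Char) := (pvGroupB ps).values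

def pvCnt (ps : List (Char × String)) (c : Char) : Int :=
  ((pvLs ps).map (fun ls => (ls.count c : Int))).sum

def pvCom (ps : List (Char × String)) (a b : Char) : Int :=
  ((pvLs ps).map (fun ls => (ls.count a : Int) * (ls.count b : Int))).sum

def pvInter (W1 W2 : PySem.Set String) : Int :=
  W1.foldl (fun i w => if PySem.Set.contains W2 w then i + 1 else i) 0

def pvSum2 (K : List Char) (F : Char → Char → Int) : Int :=
  (K.map (fun c1 => (K.map (fun c2 => F c1 c2)).sum)).sum

def pvTermA (ps : List (Char × String)) (c1 c2 : Char) : Int :=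
  if c1 = c2 then 0 else
    (PySem.Set.len (pvWA ps c1) - pvInter (pvWA ps c1) (pvWA ps c2)) *
      (PySem.Set.len (pvWA ps c2) - pvInter (pvWA ps c1) (pvWA ps c2))

def pvTermB (ps : List (Char × String)) (c1 c2 : Char) : Int :=
  if c1 = c2 then 0 else
    (pvCnt ps c1 - pvCom ps c1 c2) * (pvCnt ps c2 - pvCom ps c1 c2)


lemma pv_foldl_skip_add {α : Type} (l : List α) (eqc : α → α → Bool) (f : α → α → Int) :
    l.foldl (fun acc x1 => l.foldl
        (fun acc x2 => if eqc x1 x2 then acc else acc + f x1 x2) acc) 0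
      = (l.map (fun x1 => (l.map (fun x2 => if eqc x1 x2 then 0 else f x1 x2)).sum)).sum := by
  have hstep : ∀ (x1 : α) (init : Int), l.foldl
      (fun acc x2 => if eqc x1 x2 then acc else acc + f x1 x2) init
      = init + (l.map (fun x2 => if eqc x1 x2 then 0 else f x1 x2)).sum := by
    intro x1 init
    have : (fun (acc : Int) x2 => if eqc x1 x2 then acc else acc + f x1 x2)
        = fun acc x2 => acc + (if eqc x1 x2 then 0 else f x1 x2) := by
      funext acc x2; split <;> simp
    rw [this, PySem.List.foldl_add]
  have : (fun (acc : Int) x1 => l.foldl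
      (fun acc x2 => if eqc x1 x2 then acc else acc + f x1 x2) acc)
      = fun acc x1 => acc + (l.map (fun x2 => if eqc x1 x2 then 0 else f x1 x2)).sum := by
    funext acc x1; exact hstep x1 acc
  rw [this, PySem.List.foldl_add, zero_add]


lemma pv_groupA_eq (ideas : List String) :
    (ideas.foldl (fun d idea =>
      match PySem.Str.pyGet? idea 0 with
      | none => d
      | some fc => d.modify fc PySem.Set.empty
          (fun s => PySem.Set.add s (PySem.Str.slice idea (some 1) none))) PySem.Dict.empty)
      = pvGroupA (pvPairs ideas) := by
  rw [pvGroupA, pvPairs, List.foldl_filterMap]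
  congr 1
  funext d s
  cases h : PySem.Str.pyGet? s 0 <;> simp

lemma pv_getD_groupA (ps : List (Char × String)) (c : Char) :
    (pvGroupA ps).getD c PySem.Set.empty
      = PySem.Set.ofList ((ps.filter (fun p => p.1 == c)).map Prod.snd) := by
  induction ps using List.reverseRecOn with
  | nil => simp [pvGroupA, PySem.Dict.getD_empty, PySem.Set.ofList]
  | append_singleton ps p ih =>
      rw [pvGroupA, List.foldl_append] at *
      rw [List.foldl_cons, List.foldl_nil]
      rw [PySem.Dict.getD_modify]
      by_cases hc : c = p.1
      · subst hc
        simp only [List.filter_append, List.map_append, if_pos trivial, ih]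
        simp [List.filter, PySem.Set.ofList_append_singleton]
      · rw [if_neg hc, ih]
        have h0 : (List.filter (fun p' => p'.1 == c) [p]) = [] := by
          simp [beq_iff_eq, Ne.symm hc]
        simp [List.filter_append, h0]


lemma pv_mem_groupA (ps : List (Char × String)) (c : Char) (s : String) :
    s ∈ pvWA ps c ↔ (c, s) ∈ ps := by
  rw [pvWA, pv_getD_groupA, PySem.Set.mem_ofList]
  simp only [List.mem_map, List.mem_filter, beq_iff_eq]
  constructor
  · rintro ⟨p, ⟨hp, h1⟩, h2⟩
    cases p; subst h1; subst h2; exact hp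
  · intro h; exact ⟨(c, s), ⟨h, rfl⟩, rfl⟩

lemma pv_nodup_WA (ps : List (Char × String)) (c : Char) : (pvWA ps c).Nodup := by
  rw [pvWA, pv_getD_groupA]; exact PySem.Set.nodup_ofList _

lemma pv_keys_groupA (ps : List (Char × String)) :
    (pvGroupA ps).keys = PySem.Set.ofList (ps.map Prod.fst) := by
  rw [pvGroupA, PySem.Dict.keys_foldl_modify_key ps Prod.fst PySem.Set.empty
    (fun d p => fun s => PySem.Set.add s p.2) PySem.Dict.empty]
  rw [PySem.Dict.keys_empty, PySem.Set.update_nil_left]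



lemma pv_groupB_eq (ideas : List String) :
    (ideas.foldl (fun d idea =>
      match PySem.Str.pyGet? idea 0 with
      | none => d
      | some fc => d.modify (PySem.Str.slice idea (some 1) none) PySem.Set.empty
          (fun s => PySem.Set.add s fc)) PySem.Dict.empty)
      = pvGroupB (pvPairs ideas) := by
  rw [pvGroupB, pvPairs, List.foldl_filterMap]
  congr 1
  funext d s
  cases h : PySem.Str.pyGet? s 0 <;> simp

lemma pv_getD_groupB (ps : List (Char × String)) (s : String) :
    (pvGroupB ps).getD s PySem.Set.empty
      = PySem.Set.ofList ((ps.filter (fun p => p.2 == s)).map Prod.fst) := by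
  induction ps using List.reverseRecOn with
  | nil => simp [pvGroupB, PySem.Dict.getD_empty, PySem.Set.ofList]
  | append_singleton ps p ih =>
      rw [pvGroupB, List.foldl_append] at *
      rw [List.foldl_cons, List.foldl_nil]
      rw [PySem.Dict.getD_modify]
      by_cases hc : s = p.2
      · subst hc
        simp only [List.filter_append, List.map_append, if_pos trivial, ih]
        simp [List.filter, PySem.Set.ofList_append_singleton]
      · rw [if_neg hc, ih]
        have h0 : (List.filter (fun p' => p'.2 == s) [p]) = [] := by
          simp [beq_iff_eq, Ne.symm hc]
        simp [List.filter_append, h0]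

lemma pv_mem_groupB (ps : List (Char × String)) (s : String) (c : Char) :
    c ∈ (pvGroupB ps).getD s PySem.Set.empty ↔ (c, s) ∈ ps := by
  rw [pv_getD_groupB, PySem.Set.mem_ofList]
  simp only [List.mem_map, List.mem_filter, beq_iff_eq]
  constructor
  · rintro ⟨p, ⟨hp, h1⟩, h2⟩
    cases p; subst h1; subst h2; exact hp
  · intro h; exact ⟨(c, s), ⟨h, rfl⟩, rfl⟩

lemma pv_nodup_getD_groupB (ps : List (Char × String)) (s : String) :
    ((pvGroupB ps).getD s PySem.Set.empty).Nodup := by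
  rw [pv_getD_groupB]; exact PySem.Set.nodup_ofList _

lemma pv_keys_groupB (ps : List (Char × String)) :
    (pvGroupB ps).keys = PySem.Set.ofList (ps.map Prod.snd) := by
  rw [pvGroupB, PySem.Dict.keys_foldl_modify_key ps Prod.snd PySem.Set.empty
    (fun d p => fun s => PySem.Set.add s p.1) PySem.Dict.empty]
  rw [PySem.Dict.keys_empty, PySem.Set.update_nil_left]


lemma pv_inner_fst (c1 : Char) (ls : List Char)
    (st : PySem.Dict Char Int × PySem.Dict (Char × Char) Int) :
    (ls.foldl (fun st c2 => if c1 == c2 then st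
        else (st.1, st.2.modify (c1, c2) 0 (· + 1))) st).1 = st.1 := by
  induction ls generalizing st with
  | nil => rfl
  | cons c2 t ih =>
      rw [List.foldl_cons, ih]
      split <;> rfl

lemma pv_inner_snd (c1 : Char) (ls : List Char)
    (st : PySem.Dict Char Int × PySem.Dict (Char × Char) Int) (a b : Char) :
    (ls.foldl (fun st c2 => if c1 == c2 then st
        else (st.1, st.2.modify (c1, c2) 0 (· + 1))) st).2.getD (a, b) 0
      = st.2.getD (a, b) 0 + (if a = c1 ∧ b ≠ c1 then (ls.count b : Int) else 0) := by
  induction ls generalizing st with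
  | nil => simp
  | cons c2 t ih =>
      rw [List.foldl_cons, ih]
      by_cases h12 : c1 = c2
      · subst h12
        rw [if_pos (by simp)]
        simp only [List.count_cons]
        by_cases ha : a = c1 <;> by_cases hb : b = c1 <;>
          simp_all [Ne.symm]
      · rw [if_neg (by simpa using h12)]
        dsimp only
        rw [PySem.Dict.getD_modify]
        simp only [List.count_cons, Prod.mk.injEq, Nat.cast_add, Nat.cast_ite,
          Nat.cast_one, Nat.cast_zero]
        split_ifs <;> first | (simp_all; omega) | simp_all

lemma pv_keys_modify_add (d : PySem.Dict Char Int) (k : Char) (d0 : Int) (f : Int → Int) :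
    (d.modify k d0 f).keys = PySem.Set.add d.keys k := by
  rw [PySem.Dict.keys_modify]
  by_cases h : k ∈ d.keys
  · rw [PySem.Dict.keys_insert_of_contains _ _ (by rw [PySem.Dict.contains_eq_decide_mem_keys]; simpa),
      PySem.Set.add_of_mem h]
  · rw [PySem.Dict.keys_insert_of_not_contains _ _ (by rw [PySem.Dict.contains_eq_decide_mem_keys]; simpa),
      PySem.Set.add_of_not_mem h]

lemma pv_outer_fst (ls1 ls2 : List Char)
    (st : PySem.Dict Char Int × PySem.Dict (Char × Char) Int) (c : Char) :
    (ls1.foldl (fun st c1 => ls2.foldl (fun st c2 => if c1 == c2 then st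
        else (st.1, st.2.modify (c1, c2) 0 (· + 1)))
        (st.1.modify c1 0 (· + 1), st.2)) st).1.getD c 0
      = st.1.getD c 0 + (ls1.count c : Int) := by
  induction ls1 generalizing st with
  | nil => simp
  | cons c1 t ih =>
      rw [List.foldl_cons, ih, pv_inner_fst]
      dsimp only
      rw [PySem.Dict.getD_modify, List.count_cons]
      simp only [beq_iff_eq]
      by_cases hc : c = c1
      · rw [if_pos hc, if_pos hc.symm]
        rw [hc]
        push_cast
        ring
      · rw [if_neg hc, if_neg (fun h => hc h.symm)]
        push_cast
        ring

lemma pv_outer_keys (ls1 ls2 : List Char)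
    (st : PySem.Dict Char Int × PySem.Dict (Char × Char) Int) :
    (ls1.foldl (fun st c1 => ls2.foldl (fun st c2 => if c1 == c2 then st
        else (st.1, st.2.modify (c1, c2) 0 (· + 1)))
        (st.1.modify c1 0 (· + 1), st.2)) st).1.keys
      = PySem.Set.update st.1.keys ls1 := by
  induction ls1 generalizing st with
  | nil => rfl
  | cons c1 t ih =>
      rw [List.foldl_cons, ih, pv_inner_fst, PySem.Set.update_cons]
      dsimp only
      rw [pv_keys_modify_add]

lemma pv_outer_snd (ls1 ls2 : List Char)
    (st : PySem.Dict Char Int × PySem.Dict (Char × Char) Int) (a b : Char) :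
    (ls1.foldl (fun st c1 => ls2.foldl (fun st c2 => if c1 == c2 then st
        else (st.1, st.2.modify (c1, c2) 0 (· + 1)))
        (st.1.modify c1 0 (· + 1), st.2)) st).2.getD (a, b) 0
      = st.2.getD (a, b) 0 + (if a = b then 0 else (ls1.count a : Int) * (ls2.count b : Int)) := by
  induction ls1 generalizing st with
  | nil => simp
  | cons c1 t ih =>
      rw [List.foldl_cons, ih, pv_inner_snd]
      dsimp only
      by_cases hab : a = b
      · rw [if_pos hab, if_pos hab,
          if_neg (fun (h : a = c1 ∧ b ≠ c1) => h.2 (hab ▸ h.1))]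
        ring
      · rw [if_neg hab, if_neg hab, List.count_cons]
        simp only [beq_iff_eq]
        by_cases hac : a = c1
        · rw [if_pos ⟨hac, fun h => hab (hac.trans h.symm)⟩, if_pos hac.symm]
          push_cast
          ring
        · rw [if_neg (fun (h : a = c1 ∧ b ≠ c1) => hac h.1),
            if_neg (fun h => hac h.symm)]
          push_cast
          ring

lemma pv_cc_fst (Ls : List (PySem.Set Char))
    (st : PySem.Dict Char Int × PySem.Dict (Char × Char) Int) (c : Char) :
    (Ls.foldl (fun st letters => letters.foldl (fun st c1 => letters.foldl
        (fun st c2 => if c1 == c2 then st else (st.1, st.2.modify (c1, c2) 0 (· + 1)))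
        (st.1.modify c1 0 (· + 1), st.2)) st) st).1.getD c 0
      = st.1.getD c 0 + ((Ls.map (fun ls => (ls.count c : Int))).sum) := by
  induction Ls generalizing st with
  | nil => simp
  | cons ls t ih =>
      rw [List.foldl_cons, ih, pv_outer_fst]
      simp only [List.map_cons, List.sum_cons]
      ring

lemma pv_cc_keys (Ls : List (PySem.Set Char))
    (st : PySem.Dict Char Int × PySem.Dict (Char × Char) Int) :
    (Ls.foldl (fun st letters => letters.foldl (fun st c1 => letters.foldl
        (fun st c2 => if c1 == c2 then st else (st.1, st.2.modify (c1, c2) 0 (· + 1)))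
        (st.1.modify c1 0 (· + 1), st.2)) st) st).1.keys
      = PySem.Set.update st.1.keys Ls.flatten := by
  induction Ls generalizing st with
  | nil => rfl
  | cons ls t ih =>
      rw [List.foldl_cons, ih, pv_outer_keys, List.flatten_cons, PySem.Set.update_append]

lemma pv_cc_snd (Ls : List (PySem.Set Char))
    (st : PySem.Dict Char Int × PySem.Dict (Char × Char) Int) (a b : Char) :
    (Ls.foldl (fun st letters => letters.foldl (fun st c1 => letters.foldl
        (fun st c2 => if c1 == c2 then st else (st.1, st.2.modify (c1, c2) 0 (· + 1)))
        (st.1.modify c1 0 (· + 1), st.2)) st) st).2.getD (a, b) 0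
      = st.2.getD (a, b) 0
        + (if a = b then 0
           else ((Ls.map (fun ls => (ls.count a : Int) * (ls.count b : Int))).sum)) := by
  induction Ls generalizing st with
  | nil => simp
  | cons ls t ih =>
      rw [List.foldl_cons, ih, pv_outer_snd]
      simp only [List.map_cons, List.sum_cons]
      by_cases hab : a = b
      · rw [if_pos hab, if_pos hab, if_pos hab]
        ring
      · rw [if_neg hab, if_neg hab, if_neg hab]
        ring


lemma pv_nodup_keysB (ps : List (Char × String)) : (pvGroupB ps).keys.Nodup := by
  rw [pv_keys_groupB]; exact PySem.Set.nodup_ofList _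

lemma pv_Ls_eq (ps : List (Char × String)) :
    pvLs ps = (pvGroupB ps).keys.map (fun s => (pvGroupB ps).getD s PySem.Set.empty) :=
  PySem.Dict.values_eq_map_keys _ (pv_nodup_keysB ps) _

lemma pv_mem_keysB (ps : List (Char × String)) {c : Char} {s : String} (h : (c, s) ∈ ps) :
    s ∈ (pvGroupB ps).keys := by
  rw [pv_keys_groupB, PySem.Set.mem_ofList]
  exact List.mem_map.mpr ⟨(c, s), h, rfl⟩

lemma pv_len_nodup_eq {α : Type} (l1 l2 : List α) (h1 : l1.Nodup) (h2 : l2.Nodup)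
    (h : ∀ x, x ∈ l1 ↔ x ∈ l2) : l1.length = l2.length :=
  ((List.perm_ext_iff_of_nodup h1 h2).mpr h).length_eq

lemma pv_cnt_eq (ps : List (Char × String)) (c : Char) :
    PySem.Set.len (pvWA ps c) = pvCnt ps c := by
  rw [pvCnt, pv_Ls_eq, List.map_map]
  rw [List.map_congr_left (g := fun s => if decide (c ∈ (pvGroupB ps).getD s PySem.Set.empty) = true then (1 : Int) else 0)
    (fun s _ => by
      by_cases hm : c ∈ (pvGroupB ps).getD s PySem.Set.empty
      · simp only [Function.comp_apply]; rw [
          List.count_eq_one_of_mem (pv_nodup_getD_groupB ps s) hm, if_pos (decide_eq_true hm)]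
        exact Nat.cast_one
      · simp only [Function.comp_apply]; rw [ List.count_eq_zero.mpr hm, if_neg (by simpa using hm)]
        exact Nat.cast_zero)]
  rw [PySem.List.sum_map_ite_one_zero, List.countP_eq_length_filter]
  show ((pvWA ps c).length : Int) = _
  congr 1
  refine pv_len_nodup_eq _ _ (pv_nodup_WA ps c) ((pv_nodup_keysB ps).filter _) (fun s => ?_)
  rw [List.mem_filter, pv_mem_groupA]
  simp only [decide_eq_true_eq, pv_mem_groupB]
  exact ⟨fun h => ⟨pv_mem_keysB ps h, h⟩, fun h => h.2⟩

lemma pv_com_eq (ps : List (Char × String)) (c1 c2 : Char) :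
    pvInter (pvWA ps c1) (pvWA ps c2) = pvCom ps c1 c2 := by
  rw [pvInter, PySem.List.foldl_count_if (fun w => PySem.Set.contains (pvWA ps c2) w), zero_add]
  rw [pvCom, pv_Ls_eq, List.map_map]
  rw [List.map_congr_left (g := fun s =>
      if (decide (c1 ∈ (pvGroupB ps).getD s PySem.Set.empty)
          && decide (c2 ∈ (pvGroupB ps).getD s PySem.Set.empty)) = true then (1 : Int) else 0)
    (fun s _ => by
      by_cases h1 : c1 ∈ (pvGroupB ps).getD s PySem.Set.empty
      · by_cases h2 : c2 ∈ (pvGroupB ps).getD s PySem.Set.empty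
        · simp only [Function.comp_apply]; rw [ List.count_eq_one_of_mem (pv_nodup_getD_groupB ps s) h1,
            List.count_eq_one_of_mem (pv_nodup_getD_groupB ps s) h2, if_pos (by rw [decide_eq_true h1, decide_eq_true h2]; rfl)]
          norm_num
        · simp only [Function.comp_apply]; rw [ List.count_eq_zero.mpr h2, if_neg (fun hc => h2 (of_decide_eq_true ((Bool.and_eq_true _ _).mp hc).2))]
          norm_num
      · simp only [Function.comp_apply]; rw [ List.count_eq_zero.mpr h1, if_neg (fun hc => h1 (of_decide_eq_true ((Bool.and_eq_true _ _).mp hc).1))]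
        norm_num)]
  rw [PySem.List.sum_map_ite_one_zero, List.countP_eq_length_filter,
    List.countP_eq_length_filter]
  congr 1
  refine pv_len_nodup_eq _ _ ((pv_nodup_WA ps c1).filter _) ((pv_nodup_keysB ps).filter _)
    (fun s => ?_)
  rw [List.mem_filter, List.mem_filter, pv_mem_groupA, PySem.Set.contains_iff, pv_mem_groupA]
  simp only [Bool.and_eq_true, decide_eq_true_eq, pv_mem_groupB]
  exact ⟨fun h => ⟨pv_mem_keysB ps h.1, h.1, h.2⟩, fun h => ⟨h.2.1, h.2.2⟩⟩

lemma pv_term_eq (ps : List (Char × String)) (c1 c2 : Char) :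
    pvTermA ps c1 c2 = pvTermB ps c1 c2 := by
  rw [pvTermA, pvTermB, pv_cnt_eq, pv_cnt_eq, pv_com_eq]

lemma pv_memK (ps : List (Char × String)) (c : Char) :
    c ∈ (pvGroupA ps).keys ↔ c ∈ PySem.Set.ofList (pvLs ps).flatten := by
  rw [pv_keys_groupA, PySem.Set.mem_ofList, PySem.Set.mem_ofList, List.mem_flatten]
  constructor
  · intro h
    obtain ⟨p, hp, hc⟩ := List.mem_map.mp h
    refine ⟨(pvGroupB ps).getD p.2 PySem.Set.empty, ?_, ?_⟩
    · rw [pv_Ls_eq]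
      exact List.mem_map.mpr ⟨p.2, pv_mem_keysB ps (show (c, p.2) ∈ ps from hc ▸ (by simpa using hp)), rfl⟩
    · rw [pv_mem_groupB]
      cases p; cases hc; simpa using hp
  · rintro ⟨ls, hls, hc⟩
    rw [pv_Ls_eq] at hls
    obtain ⟨s, _, rfl⟩ := List.mem_map.mp hls
    rw [pv_mem_groupB] at hc
    exact List.mem_map.mpr ⟨(c, s), hc, rfl⟩

lemma pv_sum2_congr (K K' : List Char) (F G : Char → Char → Int)
    (hK : K.Perm K') (hFG : ∀ c1 c2, F c1 c2 = G c1 c2) : pvSum2 K F = pvSum2 K' G := by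
  have hF : F = G := funext fun a => funext fun b => hFG a b
  subst hF
  rw [pvSum2, pvSum2]
  calc (K.map (fun c1 => (K.map (fun c2 => F c1 c2)).sum)).sum
      = (K.map (fun c1 => (K'.map (fun c2 => F c1 c2)).sum)).sum := by
        exact congrArg List.sum (List.map_congr_left (fun c1 _ => (hK.map _).sum_eq))
    _ = (K'.map (fun c1 => (K'.map (fun c2 => F c1 c2)).sum)).sum :=
        (hK.map _).sum_eq


lemma pv_A_eq (ideas : List String) :
    distinctNames ideas = pvSum2 (pvGroupA (pvPairs ideas)).keys (pvTermA (pvPairs ideas)) := by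
  simp only [distinctNames]
  rw [pv_groupA_eq]
  rw [pv_foldl_skip_add]
  rw [PySem.Dict.items_eq_map_keys _ (by rw [pv_keys_groupA]; exact PySem.Set.nodup_ofList _)
    PySem.Set.empty]
  simp only [List.map_map, pvSum2]
  apply congrArg List.sum
  apply List.map_congr_left
  intro c1 _
  apply congrArg List.sum
  apply List.map_congr_left
  intro c2 _
  simp only [Function.comp_apply, pvTermA, pvWA, pvInter, beq_iff_eq]
  split <;> rfl


lemma pv_B_eq (ideas : List String) :
    distinctNames_alt ideas
      = pvSum2 (PySem.Set.ofList (pvLs (pvPairs ideas)).flatten) (pvTermB (pvPairs ideas)) := by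
  simp only [distinctNames_alt]
  rw [pv_groupB_eq]
  rw [pv_foldl_skip_add]
  have hv : (pvGroupB (pvPairs ideas)).values = pvLs (pvPairs ideas) := rfl
  rw [hv]
  rw [pv_cc_keys]
  rw [PySem.Dict.keys_empty]
  rw [PySem.Set.update_nil_left]
  simp only [pvSum2]
  apply congrArg List.sum
  apply List.map_congr_left
  intro c1 _
  apply congrArg List.sum
  apply List.map_congr_left
  intro c2 _
  rw [pv_cc_fst, pv_cc_fst, pv_cc_snd]
  simp only [PySem.Dict.getD_empty, beq_iff_eq, zero_add, pvTermB]
  by_cases h : c1 = c2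
  · rw [if_pos h, if_pos h]
  · rw [if_neg h, if_neg h, if_neg h, pvCnt, pvCnt, pvCom]


-- ===== VERDICT (by name: the statement is the Claim_ definition above) =====
theorem distinctNames_spec : Claim_equal_distinctNames := by
  intro ideas _ _
  unfold Spec_distinctNames
  rw [pv_A_eq, pv_B_eq]
  exact pv_sum2_congr _ _ _ _
    ((List.perm_ext_iff_of_nodup
        (by rw [pv_keys_groupA]; exact PySem.Set.nodup_ofList _)
        (PySem.Set.nodup_ofList _)).mpr (pv_memK (pvPairs ideas)))
    (pv_term_eq (pvPairs ideas))
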